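-- pv_equiv track=rewrite | github.com/Mingkai406/CS5001 | threshold.py | find_threshold
-- ===== SOURCE A (Python) =====
-- def find_threshold(threshold):
--     # Initialize variables
--     a = 1
--     s_n = a  # Inicialize cumulative sum
--     n = 0    # Start from n = 0
--
--     #Keep looping while the sum is below or equal to the threshold
--     while s_n <= threshold:
--         n = n + 1
--         a = 2 * a + 1
--         s_n = s_n + a       # Add to cumulative sum
--
--     return n, s_n  # Return the smallest n and cumulative sum
-- ===== SOURCE B (Python) =====
-- def find_threshold(threshold):
--     # Closed form: s_n = 2**(n+2) - n - 3; binary search for the least n with s_n > threshold.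
--     if threshold < 1:
--         return 0, 1
--     lo, hi = 0, threshold.bit_length()   # s_hi > threshold (proved in the Lean file)
--     while lo < hi:
--         mid = (lo + hi) // 2
--         if (1 << (mid + 2)) - mid - 3 > threshold:
--             hi = mid
--         else:
--             lo = mid + 1
--     return lo, (1 << (lo + 2)) - lo - 3
-- ===== Notes on version B (the rewrite author's own statement) =====
-- stated objective: alternative
-- what changed: Replaces the linear cumulative-sum loop by the closed form s_n = 2^(n+2) - n - 3 together with an integer binary search (upper bound from bit_length) for the least n with s_n > threshold.
import Mathlib
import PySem

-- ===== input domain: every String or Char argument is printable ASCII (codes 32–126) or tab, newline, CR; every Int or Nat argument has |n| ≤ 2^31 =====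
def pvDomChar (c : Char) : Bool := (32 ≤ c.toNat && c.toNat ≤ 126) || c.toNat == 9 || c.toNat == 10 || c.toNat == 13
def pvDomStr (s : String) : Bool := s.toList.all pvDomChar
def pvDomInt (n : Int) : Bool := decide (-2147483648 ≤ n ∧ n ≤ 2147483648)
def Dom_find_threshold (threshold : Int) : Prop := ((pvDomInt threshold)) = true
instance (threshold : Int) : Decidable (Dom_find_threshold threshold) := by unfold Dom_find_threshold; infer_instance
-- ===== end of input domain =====

-- B replaces A's linear cumulative-sum loop by the closed form s_n = 2^(n+2) - n - 3 and an
-- integer binary search for the least n with s_n > threshold (alternative algorithm).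

-- ===== PORT A =====
-- fuel makes the while loop total; under Dom (|threshold| ≤ 2^31) the loop exits within 33
-- iterations, so fuel 64 is never exhausted on the domain the claim covers.
def find_threshold_loopA (threshold : Int) : Nat → Int → Int → Int → Int × Int
  | 0, _, s_n, n => (n, s_n)
  | fuel+1, a, s_n, n =>
    if s_n ≤ threshold then
      find_threshold_loopA threshold fuel (2*a + 1) (s_n + (2*a + 1)) (n + 1)
    else (n, s_n)

def find_threshold (threshold : Int) : Int × Int :=
  find_threshold_loopA threshold 64 1 1 0

-- ===== PORT B =====
-- closed form s_n = 2^(n+2) - n - 3, written (1 << (n+2)) - n - 3 in Source B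
def fB (n : Nat) : Int := 2 ^ (n + 2) - (n : Int) - 3

-- the 'while lo < hi' binary-search loop of Source B
def find_threshold_loopB (threshold : Int) (lo hi : Nat) : Nat :=
  if lo < hi then
    let mid := (lo + hi) / 2
    if threshold < fB mid then find_threshold_loopB threshold lo mid
    else find_threshold_loopB threshold (mid + 1) hi
  else lo
termination_by hi - lo
decreasing_by all_goals omega

def find_threshold_alt (threshold : Int) : Int × Int :=
  if threshold < 1 then (0, 1)
  else
    -- threshold.bit_length() ported as Nat.size
    let lo := find_threshold_loopB threshold 0 (Nat.size threshold.toNat)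
    ((lo : Int), fB lo)

-- ===== PRECONDITION & SPEC =====
def Spec_find_threshold (threshold : Int) (out : Int × Int) : Prop := out = find_threshold_alt threshold
instance (threshold : Int) (out : Int × Int) : Decidable (Spec_find_threshold threshold out) := by unfold Spec_find_threshold; infer_instance

-- ===== CLAIM (what is proved, stated in full; the proofs are below) =====
def Claim_equal_find_threshold : Prop := ∀ (threshold : Int), Dom_find_threshold threshold → Spec_find_threshold threshold (find_threshold threshold)

-- ===== LEMMAS AND PROOFS =====

-- reference linear search, used only in the proofs
def leastFrom (t : Int) : Nat → Nat → Nat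
  | 0, n => n
  | fuel+1, n => if fB n ≤ t then leastFrom t fuel (n+1) else n

lemma fB_succ (n : Nat) : fB (n+1) = fB n + (2 ^ (n+2) - 1) := by
  simp only [fB, pow_succ]
  push_cast
  ring

lemma fB_mono : Monotone fB := by
  apply monotone_nat_of_le_succ
  intro n
  rw [fB_succ]
  have : (0 : Int) < 2 ^ (n+2) := by positivity
  omega

lemma two_pow_gt (n : Nat) : (n : Int) < 2 ^ n := by
  exact_mod_cast Nat.lt_two_pow_self

lemma exists_fB_gt (t : Int) : ∃ n, t < fB n := by
  refine ⟨t.toNat, ?_⟩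
  have h1 : t ≤ (t.toNat : Int) := Int.self_le_toNat t
  have h2 : ((t.toNat : Nat) : Int) < 2 ^ t.toNat := two_pow_gt t.toNat
  have h3 : (2 : Int) ^ (t.toNat + 2) = 4 * 2 ^ t.toNat := by rw [pow_succ, pow_succ]; ring
  simp only [fB]
  omega

-- the least n with fB n > t
def NIdx (t : Int) : Nat := Nat.find (exists_fB_gt t)

lemma NIdx_spec (t : Int) : t < fB (NIdx t) := Nat.find_spec (exists_fB_gt t)

lemma NIdx_le (t : Int) {n : Nat} (h : t < fB n) : NIdx t ≤ n := Nat.find_le h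

-- A's loop computes the reference linear search
lemma loopA_eq_leastFrom (fuel : Nat) : ∀ (n : Nat) (t : Int),
    find_threshold_loopA t fuel (2 ^ (n+1) - 1) (fB n) (n : Int)
      = ((leastFrom t fuel n : Int), fB (leastFrom t fuel n)) := by
  induction fuel with
  | zero => intro n t; simp [find_threshold_loopA, leastFrom]
  | succ fuel ih =>
    intro n t
    simp only [find_threshold_loopA, leastFrom]
    by_cases h : fB n ≤ t
    · simp only [if_pos h]
      have ha : 2 * (2 ^ (n+1) - 1) + 1 = (2 : Int) ^ (n+2) - 1 := by
        rw [pow_succ]; ring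
      have hs : fB n + (2 * (2 ^ (n+1) - 1) + 1) = fB (n+1) := by
        rw [ha, fB_succ]
      have hn : ((n : Int) + 1) = ((n + 1 : Nat) : Int) := by push_cast; ring
      rw [ha, ← fB_succ, hn, ih (n+1) t]
      
    · simp [h]

-- the reference linear search finds NIdx when given enough fuel
lemma leastFrom_eq_NIdx (fuel : Nat) : ∀ (n : Nat) (t : Int),
    n ≤ NIdx t → NIdx t ≤ n + fuel → leastFrom t fuel n = NIdx t := by
  induction fuel with
  | zero => intro n t h1 h2; simp only [leastFrom]; omega
  | succ fuel ih =>
    intro n t h1 h2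
    simp only [leastFrom]
    by_cases h : fB n ≤ t
    · have hne : n ≠ NIdx t := by
        intro he; rw [he] at h; have := NIdx_spec t; omega
      simp only [if_pos h]
      exact ih (n+1) t (by omega) (by omega)
    · have : NIdx t ≤ n := NIdx_le t (by omega)
      simp only [if_neg h]; omega

-- B's binary search finds NIdx
lemma loopB_eq_NIdx (t : Int) : ∀ (k lo hi : Nat), hi - lo ≤ k →
    lo ≤ hi → (∀ m, m < lo → fB m ≤ t) → t < fB hi →
    find_threshold_loopB t lo hi = NIdx t := by
  intro k
  induction k with
  | zero =>
    intro lo hi hk hle hinv hhi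
    have : lo = hi := by omega
    subst this
    rw [find_threshold_loopB]
    simp only [lt_irrefl, if_false]
    have h1 : NIdx t ≤ lo := NIdx_le t hhi
    have h2 : lo ≤ NIdx t := by
      by_contra hc
      have := hinv (NIdx t) (by omega)
      have := NIdx_spec t
      omega
    omega
  | succ k ih =>
    intro lo hi hk hle hinv hhi
    rw [find_threshold_loopB]
    by_cases h : lo < hi
    · simp only [if_pos h]
      set mid := (lo + hi) / 2 with hmid
      have hm1 : lo ≤ mid := by omega
      have hm2 : mid < hi := by omega
      by_cases hc : t < fB mid
      · simp only [if_pos hc]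
        exact ih lo mid (by omega) hm1 hinv hc
      · simp only [if_neg hc]
        refine ih (mid+1) hi (by omega) (by omega) ?_ hhi
        intro m hm
        rcases Nat.lt_or_ge m lo with h' | h'
        · exact hinv m h'
        · have : fB m ≤ fB mid := fB_mono (by omega)
          omega
    · simp only [if_neg h]
      have : lo = hi := by omega
      subst this
      have h1 : NIdx t ≤ lo := NIdx_le t hhi
      have h2 : lo ≤ NIdx t := by
        by_contra hc
        have := hinv (NIdx t) (by omega)
        have := NIdx_spec t
        omega
      omega

lemma size_upper (t : Int) (ht : 1 ≤ t) : t < fB (Nat.size t.toNat) := by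
  set m := t.toNat with hm
  have h1 : (m : Int) = t := by omega
  have h2 : m < 2 ^ Nat.size m := Nat.lt_size_self m
  have h3 : Nat.size m ≤ m := Nat.size_le.mpr Nat.lt_two_pow_self
  have h4 : (2 : Int) ^ (Nat.size m + 2) = 4 * 2 ^ Nat.size m := by
    rw [pow_succ, pow_succ]; ring
  have h5 : (m : Int) < 2 ^ Nat.size m := by exact_mod_cast h2
  have h6 : ((Nat.size m : Nat) : Int) ≤ (m : Int) := by exact_mod_cast h3
  simp only [fB]
  omega

-- ===== VERDICT (by name: the statement is the Claim_ definition above) =====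
theorem find_threshold_spec : Claim_equal_find_threshold := by
  intro t hdom
  have hdom' : t ≤ 2147483648 := by
    simp only [Dom_find_threshold, pvDomInt, decide_eq_true_eq] at hdom
    exact hdom.2
  show find_threshold t = find_threshold_alt t
  -- A's side: the loop returns (NIdx t, fB (NIdx t))
  have hA0 : find_threshold t
      = ((leastFrom t 64 0 : Int), fB (leastFrom t 64 0)) := by
    have := loopA_eq_leastFrom 64 0 t
    simpa [find_threshold, fB] using this
  have hN64 : NIdx t ≤ 64 := by
    apply NIdx_le
    have : fB 64 = 2 ^ 66 - 67 := by norm_num [fB]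
    rw [this]
    have : (2147483648 : Int) < 2 ^ 66 - 67 := by norm_num
    omega
  have hA : find_threshold t = ((NIdx t : Int), fB (NIdx t)) := by
    rw [hA0, leastFrom_eq_NIdx 64 0 t (Nat.zero_le _) (by omega)]
  rw [hA]
  -- B's side
  by_cases ht : t < 1
  · have hN0 : NIdx t = 0 := by
      have h1 : NIdx t ≤ 0 := NIdx_le t (by simp only [fB]; push_cast; omega)
      omega
    simp [find_threshold_alt, if_pos ht, hN0, fB]
  · simp only [find_threshold_alt, if_neg ht]
    rw [loopB_eq_NIdx t (Nat.size t.toNat) 0 (Nat.size t.toNat) (by omega)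
      (Nat.zero_le _) (fun m hm => absurd hm (Nat.not_lt_zero m))
      (size_upper t (by omega))]
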